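-- pv_equiv track=rewrite | github.com/amrawey/bookbot | stats.py | chars_appearance_count
-- ===== SOURCE A (Python) =====
-- def chars_appearance_count(text):
--     char_count = {}
--     for char in text:
--         if char.isalpha():  # Consider only alphabetic characters
--             char = char.lower()
--             if char in char_count:
--                 char_count[char] += 1
--             else:
--                 char_count[char] = 1
--     return char_count
-- ===== SOURCE B (Python) =====
-- def chars_appearance_count(text):
--     letters = [c.lower() for c in text if c.isalpha()]
--     return {c: letters.count(c) for c in dict.fromkeys(letters)}
-- ===== Notes on version B (the rewrite author's own statement) =====
-- stated objective: alternative
-- what changed: Replaces the single-pass incremental dict tally with a two-phase collect-then-count: first build the normalized letter list, then map each first-occurrence-distinct key to letters.count(key).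
import Mathlib
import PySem

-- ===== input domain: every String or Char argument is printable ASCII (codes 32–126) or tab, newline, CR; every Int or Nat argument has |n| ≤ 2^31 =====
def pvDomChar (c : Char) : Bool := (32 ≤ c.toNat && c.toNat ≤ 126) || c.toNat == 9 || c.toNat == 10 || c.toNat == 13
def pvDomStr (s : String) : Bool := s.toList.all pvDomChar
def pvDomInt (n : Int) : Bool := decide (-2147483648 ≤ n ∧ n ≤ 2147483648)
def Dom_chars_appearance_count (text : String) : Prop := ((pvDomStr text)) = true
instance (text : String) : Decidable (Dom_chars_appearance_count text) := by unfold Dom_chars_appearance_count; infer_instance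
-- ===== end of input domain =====

-- B replaces A's single-pass incremental dict tally by a collect-then-count two-phase shape (alternative decomposition, same result).

-- ===== PORT A =====
def chars_appearance_count (text : String) : List (String × Int) :=
  (text.toList.foldl (fun d c =>
    if PySem.Chars.isalpha c then
      let k := String.mk [PySem.Chars.lowerChar c]
      if d.contains k then
        d.insert k (d.getD k 0 + 1)
      else
        d.insert k 1
    else d) PySem.Dict.empty).items

-- ===== PORT B =====
def chars_appearance_count_alt (text : String) : List (String × Int) :=
  let letters := (text.toList.filter PySem.Chars.isalpha).map
    (fun c => String.mk [PySem.Chars.lowerChar c])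
  (PySem.List.dedup letters).map (fun k => (k, (letters.count k : Int)))

-- ===== PRECONDITION & SPEC =====
def Spec_chars_appearance_count (text : String) (out : List (String × Int)) : Prop := out = chars_appearance_count_alt text
instance (text : String) (out : List (String × Int)) : Decidable (Spec_chars_appearance_count text out) := by unfold Spec_chars_appearance_count; infer_instance

-- ===== CLAIM (what is proved, stated in full; the proofs are below) =====
def Claim_equal_chars_appearance_count : Prop := ∀ (text : String), Dom_chars_appearance_count text → Spec_chars_appearance_count text (chars_appearance_count text)

-- ===== LEMMAS AND PROOFS =====

-- A's two dict branches are one: if k is absent, getD k 0 = 0, so insert k 1 = insert k (getD+1).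
theorem pv_branch_eq {d : PySem.Dict String Int} {k : String} :
    (if d.contains k then d.insert k (d.getD k 0 + 1) else d.insert k 1)
      = d.insert k (d.getD k 0 + 1) := by
  by_cases h : d.contains k = true
  · simp [h]
  · have h0 : d.getD k 0 = 0 := by
      simp [PySem.Dict.getD]
      have := PySem.Dict.get?_eq_none_iff_contains (d := d) (k := k)
      rcases hg : d.get? k with _ | v
      · rfl
      · exfalso; apply h; rw [PySem.Dict.contains_eq_isSome_get?, hg]; rfl
    simp [h, h0]

-- filtering+mapping inside the fold equals folding over the filtered-mapped list
theorem pv_foldl_filter_map {α β γ : Type} (p : α → Bool) (key : α → β)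
    (g : γ → β → γ) (l : List α) (d : γ) :
    l.foldl (fun d c => if p c then g d (key c) else d) d
      = ((l.filter p).map key).foldl g d := by
  induction l generalizing d with
  | nil => rfl
  | cons c t ih =>
    by_cases h : p c = true
    · simp [h, ih]
    · simp [h, ih]

-- ===== VERDICT (by name: the statement is the Claim_ definition above) =====
theorem chars_appearance_count_spec : Claim_equal_chars_appearance_count := by
  intro text _
  unfold Spec_chars_appearance_count chars_appearance_count chars_appearance_count_alt
  have hb : (fun (d : PySem.Dict String Int) (c : Char) =>
      if PySem.Chars.isalpha c then
        let k := String.mk [PySem.Chars.lowerChar c]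
        if d.contains k then d.insert k (d.getD k 0 + 1) else d.insert k 1
      else d)
      = (fun d c => if PySem.Chars.isalpha c then
          d.insert (String.mk [PySem.Chars.lowerChar c])
            (d.getD (String.mk [PySem.Chars.lowerChar c]) 0 + 1) else d) := by
    funext d c
    by_cases h : PySem.Chars.isalpha c = true
    · simp only [h, if_true]; exact pv_branch_eq
    · simp [h]
  have h1 : text.toList.foldl (fun (d : PySem.Dict String Int) c => if PySem.Chars.isalpha c then
        d.insert (String.mk [PySem.Chars.lowerChar c])
          (d.getD (String.mk [PySem.Chars.lowerChar c]) 0 + 1) else d) PySem.Dict.empty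
      = ((text.toList.filter PySem.Chars.isalpha).map
          (fun c => String.mk [PySem.Chars.lowerChar c])).foldl
          (fun d k => d.insert k (d.getD k 0 + 1)) PySem.Dict.empty :=
    pv_foldl_filter_map PySem.Chars.isalpha
      (fun c => String.mk [PySem.Chars.lowerChar c])
      (fun (d : PySem.Dict String Int) k => d.insert k (d.getD k 0 + 1))
      text.toList PySem.Dict.empty
  rw [hb]
  refine (congrArg PySem.Dict.items h1).trans ?_
  show (PySem.Dict.counter ((text.toList.filter PySem.Chars.isalpha).map
      (fun c => String.mk [PySem.Chars.lowerChar c]))).items = _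
  rw [PySem.Dict.items_counter]
  simp [PySem.List.dedup_eq_ofList]
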